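-- pv_equiv track=rewrite | github.com/dheerosaur/leetcode-practice | python/1052.grumpy-bookstore-owner.py | maxSatisfied2
-- ===== SOURCE A (Python) =====
-- from typing import List
--
-- def maxSatisfied2(customers: List[int],
--                   grumpy: List[int], X: int) -> int:
--     def flipped(i):
--         start, end = i - X, i
--         return sum(x for x, y in
--                    zip(customers[start: end], grumpy[start: end])
--                    if y)
--     default = sum(c for i, c in enumerate(customers) if grumpy[i] == 0)
--     return max((default + flipped(i)) for i in range(X, len(grumpy) + 1))
-- ===== SOURCE B (Python) =====
-- from typing import List
--
-- def maxSatisfied2(customers: List[int],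
--                   grumpy: List[int], X: int) -> int:
--     # One pass: split each minute into always-satisfied (base) or a potential
--     # gain, then slide a length-X window over the gains incrementally.
--     base = 0
--     gains = []
--     for c, g in zip(customers, grumpy):
--         if g:
--             gains.append(c)
--         else:
--             base += c
--             gains.append(0)
--     window = sum(gains[:X])
--     best = window
--     for i in range(X, len(gains)):
--         window += gains[i] - gains[i - X]
--         if window > best:
--             best = window
--     return base + best
-- ===== Notes on version B (the rewrite author's own statement) =====
-- stated objective: faster
-- what changed: A recomputes each length-X window sum from scratch with slicing plus zip (O(n*X)); B splits customers once into a base sum and a gains array and slides the window incrementally, adding the entering and subtracting the leaving element (O(n)).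
-- outside the precondition, e.g. on maxSatisfied2([5], [1], -1): A returns 0, B raises IndexError; on maxSatisfied2([-5], [1, 0], 1): A returns 0, B returns -5
import Mathlib
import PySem

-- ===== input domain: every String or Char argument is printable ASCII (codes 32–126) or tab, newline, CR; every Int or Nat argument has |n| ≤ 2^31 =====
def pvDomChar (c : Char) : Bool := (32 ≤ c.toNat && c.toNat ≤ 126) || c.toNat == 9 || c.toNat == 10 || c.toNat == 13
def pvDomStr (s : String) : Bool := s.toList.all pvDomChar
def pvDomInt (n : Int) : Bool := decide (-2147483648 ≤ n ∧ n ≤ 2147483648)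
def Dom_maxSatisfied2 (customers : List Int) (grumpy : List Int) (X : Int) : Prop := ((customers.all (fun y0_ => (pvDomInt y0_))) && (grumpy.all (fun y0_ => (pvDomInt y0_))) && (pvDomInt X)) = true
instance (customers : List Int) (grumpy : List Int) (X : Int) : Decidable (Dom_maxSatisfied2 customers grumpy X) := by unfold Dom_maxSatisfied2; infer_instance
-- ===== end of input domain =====

-- B: one pass splitting into base sum + gains array, then an incremental sliding window (O(n) vs A's O(n*X)).
-- ===== PORT A =====
def maxSatisfied2 (customers : List Int) (grumpy : List Int) (X : Int) : Int :=
  -- def flipped(i): sum(x for x, y in zip(customers[i-X:i], grumpy[i-X:i]) if y)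
  let flipped : Int → Int := fun i =>
    let s := PySem.List.slice customers (some (i - X)) (some i)
    let t := PySem.List.slice grumpy (some (i - X)) (some i)
    ((((s.zip t).filter (fun p => p.2 ≠ 0)).map (fun p => p.1)).sum)
  -- default = sum(c for i, c in enumerate(customers) if grumpy[i] == 0)
  -- grumpy[i] via pyGet?; the none (IndexError) branch is unreachable under Pre_
  let dflt := (PySem.List.enumerate customers 0).foldl
    (fun acc p => match PySem.List.pyGet? grumpy p.1 with
                  | some g => if g = 0 then acc + p.2 else acc
                  | none => acc) 0
  -- max(default + flipped(i) for i in range(X, len(grumpy) + 1)); empty max (ValueError) excluded by Pre_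
  (PySem.List.max? ((PySem.List.pyRange X ((grumpy.length : Int) + 1) 1).map
      (fun i => dflt + flipped i)) (fun x => x)).getD 0

-- ===== PORT B =====
def maxSatisfied2_alt (customers : List Int) (grumpy : List Int) (X : Int) : Int :=
  -- for c, g in zip(customers, grumpy): if g: gains.append(c) else: base += c; gains.append(0)
  let bg := (customers.zip grumpy).foldl
    (fun (s : Int × List Int) p =>
      if p.2 ≠ 0 then (s.1, s.2 ++ [p.1]) else (s.1 + p.1, s.2 ++ [(0 : Int)]))
    (0, [])
  let base := bg.1
  let gains := bg.2
  -- window = sum(gains[:X])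
  let window0 := (PySem.List.slice gains none (some X)).sum
  -- for i in range(X, len(gains)): window += gains[i] - gains[i-X]; if window > best: best = window
  -- gains[i] / gains[i-X] via pyGetD; in range under Pre_
  let wb := (PySem.List.pyRange X (gains.length : Int) 1).foldl
    (fun (s : Int × Int) i =>
      let w := s.1 + PySem.List.pyGetD gains i 0 - PySem.List.pyGetD gains (i - X) 0
      (w, if w > s.2 then w else s.2))
    (window0, window0)
  base + wb.2

-- ===== PRECONDITION & SPEC =====
-- Pre_ restricts to the problem's natural domain: equally long lists and 0 <= X <= len(grumpy).
-- It excludes inputs A still returns on: negative X (A's value there is an accident of negative-slice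
-- wraparound; B's sliding window raises IndexError) and customers shorter than grumpy (A's value past the
-- paired region is an accident of zip truncation; B stops at the zip). A itself raises when customers is
-- longer (IndexError) or X > len(grumpy) (ValueError on an empty max).
def Pre_maxSatisfied2 (customers : List Int) (grumpy : List Int) (X : Int) : Prop :=
  customers.length = grumpy.length ∧ 0 ≤ X ∧ X ≤ (grumpy.length : Int)
instance (customers : List Int) (grumpy : List Int) (X : Int) : Decidable (Pre_maxSatisfied2 customers grumpy X) := by unfold Pre_maxSatisfied2; infer_instance
def pvWitness_maxSatisfied2 : List Int × List Int × Int := ([1, 3, 1, 1, 7, 1], [0, 1, 0, 1, 0, 1], 3)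

-- ===== PRECONDITION & SPEC (cont.) =====
def Spec_maxSatisfied2 (customers : List Int) (grumpy : List Int) (X : Int) (out : Int) : Prop := out = maxSatisfied2_alt customers grumpy X
instance (customers : List Int) (grumpy : List Int) (X : Int) (out : Int) : Decidable (Spec_maxSatisfied2 customers grumpy X out) := by unfold Spec_maxSatisfied2; infer_instance

-- ===== CLAIM (what is proved, stated in full; the proofs are below) =====
def Claim_equal_maxSatisfied2 : Prop := ∀ (customers : List Int) (grumpy : List Int) (X : Int), Dom_maxSatisfied2 customers grumpy X → Pre_maxSatisfied2 customers grumpy X → Spec_maxSatisfied2 customers grumpy X (maxSatisfied2 customers grumpy X)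

-- ===== LEMMAS AND PROOFS =====
def pvGain (p : Int × Int) : Int := if p.2 ≠ 0 then p.1 else 0
def pvLose (p : Int × Int) : Int := if p.2 ≠ 0 then 0 else p.1
def pvW (G : List Int) (Xn k : Nat) : Int := ((G.drop k).take Xn).sum

lemma pv_bfold (l : List (Int × Int)) : ∀ (a : Int) (acc : List Int),
    l.foldl (fun (s : Int × List Int) p =>
      if p.2 ≠ 0 then (s.1, s.2 ++ [p.1]) else (s.1 + p.1, s.2 ++ [(0 : Int)])) (a, acc)
    = (a + (l.map pvLose).sum, acc ++ l.map pvGain) := by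
  induction l with
  | nil => simp
  | cons p t ih =>
    intro a acc
    simp only [List.foldl_cons]
    by_cases h : p.2 = 0
    · simp only [h]
      rw [ih]
      simp [pvLose, pvGain, h, add_assoc]
    · simp only [if_pos h]
      rw [ih]
      simp [pvLose, pvGain, h]

lemma pv_filtsum (w : List (Int × Int)) :
    (((w.filter (fun p => p.2 ≠ 0)).map (fun p => p.1)).sum) = (w.map pvGain).sum := by
  induction w with
  | nil => simp
  | cons p t ih =>
    simp only [ne_eq, decide_not] at ih ⊢
    by_cases h : p.2 = 0 <;> simp [pvGain, h, ih]

lemma pv_zip_slice (c g : List Int) (k m : Nat) :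
    ((c.drop k).take m).zip ((g.drop k).take m) = ((c.zip g).drop k).take m := by
  simp [List.zip, ← List.take_zipWith, ← List.drop_zipWith]

lemma pv_default (c : List Int) : ∀ (g pre : List Int), c.length = g.length → ∀ (acc : Int),
    (PySem.List.enumerate c (pre.length : Int)).foldl
      (fun acc p => match PySem.List.pyGet? (pre ++ g) p.1 with
                    | some v => if v = 0 then acc + p.2 else acc
                    | none => acc) acc
    = acc + ((c.zip g).map pvLose).sum := by
  induction c with
  | nil => simp [PySem.List.enumerate_nil]
  | cons x c' ih =>
    intro g pre hlen acc
    cases g with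
    | nil => simp at hlen
    | cons g0 g' =>
      rw [PySem.List.enumerate_cons]
      simp only [List.foldl_cons]
      have hget : PySem.List.pyGet? (pre ++ g0 :: g') ((pre.length : Nat) : Int) = some g0 := by
        rw [PySem.List.pyGet?_natCast]
        simp
      rw [hget]
      have hre : ((pre.length : Int) + 1) = (((pre ++ [g0]).length : Nat) : Int) := by
        simp
      have happ : pre ++ g0 :: g' = (pre ++ [g0]) ++ g' := by simp
      rw [hre, happ, ih g' (pre ++ [g0]) (by simpa using hlen)]
      by_cases h : g0 = 0 <;> simp [pvLose, h, add_assoc]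

lemma pv_shift (G : List Int) (Xn k : Nat) (h : k + Xn < G.length) :
    pvW G Xn k + G.getD (k + Xn) 0 - G.getD k 0 = pvW G Xn (k + 1) := by
  have hk : k < G.length := by omega
  have h1 : (G.drop k).take (Xn + 1) = (G.drop k).take Xn ++ [G.getD (k + Xn) 0] := by
    rw [List.take_add_one]
    congr 1
    rw [List.getElem?_drop]
    rw [List.getElem?_eq_getElem h, List.getD_eq_getElem G 0 h]
    rfl
  have h2 : (G.drop k).take (Xn + 1) = G.getD k 0 :: (G.drop (k + 1)).take Xn := by
    rw [List.getD_eq_getElem G 0 hk, ← List.getElem_cons_drop hk]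
    rfl
  have := congrArg List.sum (h1.symm.trans h2)
  simp only [List.sum_append, List.sum_cons, List.sum_nil] at this
  unfold pvW
  linarith [this]

lemma pv_max_add (d : Int) (l : List Int) : ∀ (a : Int),
    (l.map (fun x => d + x)).foldl max (d + a) = d + l.foldl max a := by
  induction l with
  | nil => simp
  | cons x t ih =>
    intro a
    rw [List.map_cons, List.foldl_cons, List.foldl_cons, max_add_add_left]
    exact ih (max a x)

lemma pv_loop (G : List Int) (Xn : Nat) (X : Int) (hX : X = (Xn : Int)) :
    ∀ (t j : Nat), Xn ≤ j → j + t ≤ G.length → ∀ (b : Int),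
    ((List.range t).map (fun k => ((j + k : Nat) : Int))).foldl
      (fun (s : Int × Int) i =>
        let w := s.1 + PySem.List.pyGetD G i 0 - PySem.List.pyGetD G (i - X) 0
        (w, if w > s.2 then w else s.2)) (pvW G Xn (j - Xn), b)
    = (pvW G Xn (j + t - Xn), ((List.range t).map (fun k => pvW G Xn (j + k + 1 - Xn))).foldl max b) := by
  intro t
  induction t with
  | zero => intro j h1 h2 b; simp
  | succ t ih =>
    intro j h1 h2 b
    rw [List.range_succ]
    simp only [List.map_append, List.map_cons, List.map_nil, List.foldl_append]
    rw [ih j h1 (by omega) b]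
    simp only [List.foldl_cons, List.foldl_nil]
    have hi1 : PySem.List.pyGetD G ((j + t : Nat) : Int) 0 = G.getD (j + t) 0 :=
      PySem.List.pyGetD_natCast ..
    have hcast : ((j + t : Nat) : Int) - X = ((j + t - Xn : Nat) : Int) := by
      rw [hX]; push_cast [Nat.cast_sub (by omega : Xn ≤ j + t)]; ring
    have hi2 : PySem.List.pyGetD G (((j + t : Nat) : Int) - X) 0 = G.getD (j + t - Xn) 0 := by
      rw [hcast]; exact PySem.List.pyGetD_natCast ..
    have hsh : pvW G Xn (j + t - Xn) + G.getD (j + t) 0 - G.getD (j + t - Xn) 0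
        = pvW G Xn (j + t + 1 - Xn) := by
      have := pv_shift G Xn (j + t - Xn) (by omega)
      have he : j + t - Xn + Xn = j + t := by omega
      rw [he] at this
      have he2 : j + t - Xn + 1 = j + t + 1 - Xn := by omega
      rw [he2] at this
      exact this
    simp only [hi1, hi2, hsh]
    have hidx : j + (t + 1) - Xn = j + t + 1 - Xn := by omega
    rw [hidx]
    refine Prod.ext rfl ?_
    simp only []
    rw [max_def]
    split_ifs <;> omega

-- ===== VERDICT (by name: the statement is the Claim_ definition above) =====
theorem maxSatisfied2_spec : Claim_equal_maxSatisfied2 := by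
  intro customers grumpy X hdom hpre
  obtain ⟨hlen, hX0, hXle⟩ := hpre
  unfold Spec_maxSatisfied2
  have hX : X = (X.toNat : Int) := (Int.toNat_of_nonneg hX0).symm
  set Xn := X.toNat with hXndef
  set n := grumpy.length with hn
  set l := customers.zip grumpy with hldef
  set G := l.map pvGain with hGdef
  set base := (l.map pvLose).sum with hbase
  have hXnn : Xn ≤ n := by
    have := hXle; rw [hX] at this; exact_mod_cast this
  have hGlen : G.length = n := by
    rw [hGdef, List.length_map, hldef, List.length_zip, hlen]; omega
  set M := ((List.range (n - Xn)).map (fun k => pvW G Xn (k + 1))).foldl max (pvW G Xn 0) with hM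
  have hB : maxSatisfied2_alt customers grumpy X = base + M := by
    simp only [maxSatisfied2_alt]
    rw [pv_bfold]
    simp only [List.nil_append]
    rw [PySem.List.slice_to _ hX0]
    have hw0 : (List.take X.toNat (l.map pvGain)).sum = pvW G Xn 0 := by
      simp [pvW, hGdef, hXndef]
    rw [hw0]
    have hlist : PySem.List.pyRange X (((l.map pvGain).length : Nat) : Int) 1
        = (List.range (n - Xn)).map (fun k => ((Xn + k : Nat) : Int)) := by
      rw [PySem.List.pyRange_one]
      have h1 : ((((l.map pvGain)).length : Int) - X).toNat = n - Xn := by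
        rw [hX]; rw [← hGdef, hGlen]; omega
      rw [h1]
      apply List.map_congr_left
      intro k _
      rw [hX]; push_cast; ring
    rw [hlist, ← hGdef]
    have h0 : pvW G Xn 0 = pvW G Xn (Xn - Xn) := by rw [Nat.sub_self]
    rw [h0]
    rw [pv_loop G Xn X hX (n - Xn) Xn le_rfl (by omega) (pvW G Xn (Xn - Xn))]
    have hidx : ∀ k : Nat, Xn + k + 1 - Xn = k + 1 := by omega
    simp only [hidx, Nat.sub_self]
    rw [← hldef, ← hbase, ← hM]
    ring
  have hA : maxSatisfied2 customers grumpy X = base + M := by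
    simp only [maxSatisfied2]
    have hd : (PySem.List.enumerate customers 0).foldl
        (fun acc p => match PySem.List.pyGet? grumpy p.1 with
                      | some v => if v = 0 then acc + p.2 else acc
                      | none => acc) 0 = base := by
      have := pv_default customers grumpy [] hlen 0
      simpa [hbase, hldef] using this
    have hlist : PySem.List.pyRange X ((grumpy.length : Int) + 1)
        = (List.range ((n - Xn) + 1)).map (fun k : Nat => X + (k : Int)) := by
      rw [PySem.List.pyRange_one]
      have h1 : ((grumpy.length : Int) + 1 - X).toNat = (n - Xn) + 1 := by
        rw [hX, ← hn]; omega
      rw [h1]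
    have key : ∀ (L : List Int),
        L = (List.range ((n - Xn) + 1)).map (fun k => base + pvW G Xn k) →
        (PySem.List.max? L (fun y => y)).getD 0 = base + M := by
      intro L hL
      subst hL
      rw [List.range_succ_eq_map, List.map_cons, List.map_map, PySem.List.max?_id_cons]
      simp only [Option.getD_some]
      have hcomp : ((fun k => base + pvW G Xn k) ∘ Nat.succ) = fun k => base + pvW G Xn (k + 1) := by
        funext k; rfl
      rw [hcomp]
      have hmm : (List.range (n - Xn)).map (fun k => base + pvW G Xn (k + 1))
          = ((List.range (n - Xn)).map (fun k => pvW G Xn (k + 1))).map (fun x => base + x) := by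
        rw [List.map_map]; rfl
      rw [hmm, pv_max_add, hM]
    rw [hlist, List.map_map]
    apply key
    apply List.map_congr_left
    intro k _
    simp only [Function.comp_apply]
    rw [hd]
    congr 1
    have ha : X + (k : Int) - X = ((k : Nat) : Int) := by ring
    have hb : X + (k : Int) = ((Xn + k : Nat) : Int) := by rw [hX]; push_cast; ring
    rw [ha, hb, PySem.List.slice_natCast, PySem.List.slice_natCast]
    have hsub : Xn + k - k = Xn := by omega
    rw [hsub, pv_zip_slice, pv_filtsum]
    simp [pvW, hGdef, hldef]
  rw [hA, hB]
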